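-- pv_equiv track=rewrite | github.com/rrwick/Verticall | scripts/mask_clonalframeml_alignment.py | mask_sequence
-- ===== SOURCE A (Python) =====
-- def mask_sequence(seq, masked_regions):
--     seq = [base for base in seq]
--     for start, end in masked_regions:
--         assert start >= 0 and end <= len(seq)
--         for i in range(start, end):
--             if seq[i] != '-':
--                 seq[i] = 'N'
--     return ''.join(seq)
-- ===== SOURCE B (Python) =====
-- def mask_sequence(seq, masked_regions):
--     n = len(seq)
--     masked = [False] * n
--     for start, end in masked_regions:
--         assert start >= 0 and end <= n
--         for i in range(start, end):
--             masked[i] = True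
--     return ''.join('N' if m and c != '-' else c for m, c in zip(masked, seq))
-- ===== Notes on version B (the rewrite author's own statement) =====
-- stated objective: idiomatic
-- what changed: B first builds a boolean table of masked positions from the regions, then produces the output in one zip pass over the whole sequence, instead of A's in-place character mutation inside each region loop.
import Mathlib
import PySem

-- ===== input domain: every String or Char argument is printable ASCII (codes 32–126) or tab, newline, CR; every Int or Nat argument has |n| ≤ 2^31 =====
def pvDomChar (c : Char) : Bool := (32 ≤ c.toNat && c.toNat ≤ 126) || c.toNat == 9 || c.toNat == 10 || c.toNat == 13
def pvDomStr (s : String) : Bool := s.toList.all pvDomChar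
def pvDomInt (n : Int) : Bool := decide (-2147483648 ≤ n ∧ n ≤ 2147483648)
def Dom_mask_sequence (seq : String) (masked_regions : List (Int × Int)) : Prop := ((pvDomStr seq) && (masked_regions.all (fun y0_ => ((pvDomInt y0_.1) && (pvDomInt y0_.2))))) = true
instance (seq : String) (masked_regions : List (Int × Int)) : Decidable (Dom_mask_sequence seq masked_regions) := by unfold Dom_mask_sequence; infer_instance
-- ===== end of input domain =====

-- One honest line: B precomputes a boolean table of masked positions and builds the
-- output in a single zip pass over the sequence, instead of A's in-place mutation per region.

-- ===== PORT A =====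
-- one region: for i in range(start, end): if seq[i] != '-': seq[i] = 'N'
def maskRegionA (l : List Char) (r : Int × Int) : List Char :=
  (PySem.List.pyRange r.1 r.2 1).foldl
    (fun l i => if PySem.List.pyGetD l i ' ' ≠ '-' then PySem.List.pySetD l i 'N' else l) l

def mask_sequence (seq : String) (masked_regions : List (Int × Int)) : String :=
  String.ofList (masked_regions.foldl maskRegionA seq.toList)

-- ===== PORT B =====
-- one region: for i in range(start, end): masked[i] = True
def markRegionB (t : List Bool) (r : Int × Int) : List Bool :=
  (PySem.List.pyRange r.1 r.2 1).foldl (fun t i => PySem.List.pySetD t i true) t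

def mask_sequence_alt (seq : String) (masked_regions : List (Int × Int)) : String :=
  let chars := seq.toList
  let masked := masked_regions.foldl markRegionB (List.replicate chars.length false)
  String.ofList ((masked.zip chars).map (fun p => if p.1 && p.2 ≠ '-' then 'N' else p.2))

-- ===== PRECONDITION & SPEC =====
-- Pre_ excludes exactly the inputs on which A's 'assert start >= 0 and end <= len(seq)' raises AssertionError.
def Pre_mask_sequence (seq : String) (masked_regions : List (Int × Int)) : Prop :=
  ∀ r ∈ masked_regions, 0 ≤ r.1 ∧ r.2 ≤ (seq.toList.length : Int)
instance (seq : String) (masked_regions : List (Int × Int)) : Decidable (Pre_mask_sequence seq masked_regions) := by unfold Pre_mask_sequence; infer_instance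
def pvWitness_mask_sequence : String × (List (Int × Int)) := ("AC-GT", [(1, 4)])

def Spec_mask_sequence (seq : String) (masked_regions : List (Int × Int)) (out : String) : Prop := out = mask_sequence_alt seq masked_regions
instance (seq : String) (masked_regions : List (Int × Int)) (out : String) : Decidable (Spec_mask_sequence seq masked_regions out) := by unfold Spec_mask_sequence; infer_instance

-- ===== CLAIM (what is proved, stated in full; the proofs are below) =====
def Claim_equal_mask_sequence : Prop := ∀ (seq : String) (masked_regions : List (Int × Int)), Dom_mask_sequence seq masked_regions → Pre_mask_sequence seq masked_regions → Spec_mask_sequence seq masked_regions (mask_sequence seq masked_regions)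

-- ===== LEMMAS AND PROOFS =====

-- combine a mask table with the original characters (the body of B's final pass)
def pvCombine (t : List Bool) (s : List Char) : List Char :=
  (t.zip s).map (fun p => if p.1 && p.2 ≠ '-' then 'N' else p.2)

theorem pvCombine_length (t : List Bool) (s : List Char) :
    (pvCombine t s).length = min t.length s.length := by
  simp [pvCombine]

theorem pvCombine_getD (t : List Bool) (s : List Char) (j : Nat)
    (hj : j < s.length) (ht : t.length = s.length) :
    (pvCombine t s).getD j ' ' =
      if t.getD j false && s.getD j ' ' ≠ '-' then 'N' else s.getD j ' ' := by
  have hjt : j < t.length := by omega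
  have hj' : j < (pvCombine t s).length := by simp [pvCombine_length, ht]; omega
  rw [List.getD_eq_getElem _ _ hj', List.getD_eq_getElem _ _ hj, List.getD_eq_getElem _ _ hjt]
  simp [pvCombine, List.getElem_zip]

theorem maskRegionA_length (l : List Char) (r : Int × Int) :
    (maskRegionA l r).length = l.length := by
  unfold maskRegionA
  induction PySem.List.pyRange r.1 r.2 1 generalizing l with
  | nil => rfl
  | cons i is ih =>
      simp only [List.foldl_cons]
      rw [ih]
      split <;> simp [PySem.List.length_pySetD]

theorem markRegionB_length (t : List Bool) (r : Int × Int) :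
    (markRegionB t r).length = t.length := by
  unfold markRegionB
  induction PySem.List.pyRange r.1 r.2 1 generalizing t with
  | nil => rfl
  | cons i is ih =>
      simp only [List.foldl_cons]
      rw [ih, PySem.List.length_pySetD]

-- characterization of A's inner loop, position by position (fuel = number of remaining indices)
theorem loopA_getD (fuel : Nat) :
    ∀ (l : List Char) (a b : Int), (b - a).toNat = fuel → 0 ≤ a → b ≤ (l.length : Int) →
    ∀ j : Nat, j < l.length →
    ((PySem.List.pyRange a b 1).foldl
        (fun l i => if PySem.List.pyGetD l i ' ' ≠ '-' then PySem.List.pySetD l i 'N' else l) l).getD j ' ' =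
      if a ≤ (j : Int) ∧ (j : Int) < b ∧ l.getD j ' ' ≠ '-' then 'N' else l.getD j ' ' := by
  induction fuel with
  | zero =>
      intro l a b hfuel ha hb j hj
      rw [PySem.List.pyRange_one_eq_nil (by omega)]
      simp only [List.foldl_nil]
      rw [if_neg (by rintro ⟨h1, h2, h3⟩; omega)]
  | succ n ih =>
      intro l a b hfuel ha hb j hj
      have hab : a < b := by omega
      rw [PySem.List.pyRange_one_cons hab]
      simp only [List.foldl_cons]
      have halen : a.toNat < l.length := by omega
      have hget : PySem.List.pyGetD l a ' ' = l.getD a.toNat ' ' := by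
        rw [PySem.List.pyGetD_eq_getElem _ _ ha (by omega), List.getD_eq_getElem _ _ halen]
      set l' : List Char := if PySem.List.pyGetD l a ' ' ≠ '-' then PySem.List.pySetD l a 'N' else l with hl'
      have hlen' : l'.length = l.length := by
        rw [hl']; split <;> simp [PySem.List.length_pySetD]
      have hget' : ∀ k : Nat, k < l.length →
          l'.getD k ' ' = if (k : Int) = a ∧ l.getD k ' ' ≠ '-' then 'N' else l.getD k ' ' := by
        intro k hk
        rw [hl']
        by_cases hc : PySem.List.pyGetD l a ' ' ≠ '-'
        · rw [if_pos hc, PySem.List.pySetD_of_nonneg _ _ ha]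
          by_cases hka : (k : Int) = a
          · have : k = a.toNat := by omega
            subst this
            rw [List.getD_eq_getElem _ _ (by simpa [List.length_set] using halen)]
            simp only [List.getElem_set_self]
            rw [hget] at hc
            rw [if_pos ⟨hka, hc⟩]
          · rw [List.getD_eq_getElem _ _ (by simpa [List.length_set] using hk),
              List.getElem_set_ne (by omega), ← List.getD_eq_getElem _ _ hk, if_neg (by tauto)]
        · rw [if_neg hc]
          rw [hget] at hc
          by_cases hka : (k : Int) = a
          · have : k = a.toNat := by omega
            subst this
            rw [if_neg (by tauto)]
          · rw [if_neg (by tauto)]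
      rw [ih l' (a + 1) b (by omega) (by omega) (by omega) j (by omega)]
      rw [hget' j hj]
      by_cases hja : (j : Int) = a
      · by_cases hdash : l.getD j ' ' = '-'
        · rw [if_neg (c := ((j : Int) = a ∧ l.getD j ' ' ≠ '-')) (by tauto),
            if_neg (c := (a + 1 ≤ (j : Int) ∧ (j : Int) < b ∧ l.getD j ' ' ≠ '-')) (by tauto),
            if_neg (c := (a ≤ (j : Int) ∧ (j : Int) < b ∧ l.getD j ' ' ≠ '-')) (by tauto)]
        · rw [if_pos (c := ((j : Int) = a ∧ l.getD j ' ' ≠ '-')) ⟨hja, hdash⟩,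
            if_neg (c := (a + 1 ≤ (j : Int) ∧ (j : Int) < b ∧ ('N' : Char) ≠ '-'))
              (by rintro ⟨h, _, _⟩; omega),
            if_pos (c := (a ≤ (j : Int) ∧ (j : Int) < b ∧ l.getD j ' ' ≠ '-'))
              ⟨by omega, by omega, hdash⟩]
      · rw [if_neg (c := ((j : Int) = a ∧ l.getD j ' ' ≠ '-')) (fun h => hja h.1)]
        have hiff : (a + 1 ≤ (j : Int) ∧ (j : Int) < b ∧ l.getD j ' ' ≠ '-') ↔
            (a ≤ (j : Int) ∧ (j : Int) < b ∧ l.getD j ' ' ≠ '-') := by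
          constructor <;> rintro ⟨h1, h2, h3⟩ <;> exact ⟨by omega, h2, h3⟩
        rw [if_congr hiff rfl rfl]

theorem maskRegionA_getD (l : List Char) (a b : Int) (ha : 0 ≤ a) (hb : b ≤ (l.length : Int))
    (j : Nat) (hj : j < l.length) :
    (maskRegionA l (a, b)).getD j ' ' =
      if a ≤ (j : Int) ∧ (j : Int) < b ∧ l.getD j ' ' ≠ '-' then 'N' else l.getD j ' ' := by
  exact loopA_getD (b - a).toNat l a b rfl ha hb j hj

-- characterization of B's inner loop
theorem loopB_getD (fuel : Nat) :
    ∀ (t : List Bool) (a b : Int), (b - a).toNat = fuel → 0 ≤ a → b ≤ (t.length : Int) →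
    ∀ j : Nat, j < t.length →
    ((PySem.List.pyRange a b 1).foldl (fun t i => PySem.List.pySetD t i true) t).getD j false =
      (decide (a ≤ (j : Int) ∧ (j : Int) < b) || t.getD j false) := by
  induction fuel with
  | zero =>
      intro t a b hfuel ha hb j hj
      rw [PySem.List.pyRange_one_eq_nil (by omega)]
      simp only [List.foldl_nil]
      have : ¬ (a ≤ (j : Int) ∧ (j : Int) < b) := by omega
      simp [this]
  | succ n ih =>
      intro t a b hfuel ha hb j hj
      have hab : a < b := by omega
      rw [PySem.List.pyRange_one_cons hab]
      simp only [List.foldl_cons]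
      set t' := PySem.List.pySetD t a true with ht'
      have hlen' : t'.length = t.length := by rw [ht', PySem.List.length_pySetD]
      have hget' : ∀ k : Nat, k < t.length →
          t'.getD k false = (decide ((k : Int) = a) || t.getD k false) := by
        intro k hk
        rw [ht', PySem.List.pySetD_of_nonneg _ _ ha]
        by_cases hka : (k : Int) = a
        · have : k = a.toNat := by omega
          subst this
          rw [List.getD_eq_getElem _ _ (by simpa [List.length_set] using (by omega : a.toNat < t.length))]
          simp [hka]
        · rw [List.getD_eq_getElem _ _ (by simpa [List.length_set] using hk),
            List.getElem_set_ne (by omega)]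
          simp [hka, List.getElem?_eq_getElem hk]
      rw [ih t' (a + 1) b (by omega) (by omega) (by omega) j (by omega)]
      rw [hget' j hj]
      by_cases hja : (j : Int) = a
      · have h1 : a ≤ (j : Int) ∧ (j : Int) < b := by omega
        have h2 : ¬ (a + 1 ≤ (j : Int) ∧ (j : Int) < b) := by omega
        simp [hja]
        exact Or.inl hab
      · simp only [hja, decide_false, Bool.false_or]
        congr 1
        simp only [decide_eq_decide]
        omega

theorem markRegionB_getD (t : List Bool) (a b : Int) (ha : 0 ≤ a) (hb : b ≤ (t.length : Int))
    (j : Nat) (hj : j < t.length) :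
    (markRegionB t (a, b)).getD j false =
      (decide (a ≤ (j : Int) ∧ (j : Int) < b) || t.getD j false) := by
  exact loopB_getD (b - a).toNat t a b rfl ha hb j hj

-- lists are equal when lengths agree and getD agrees below the length
theorem pvListEq_of_getD {α : Type} (d : α) (l1 l2 : List α)
    (hlen : l1.length = l2.length)
    (h : ∀ j : Nat, j < l1.length → l1.getD j d = l2.getD j d) : l1 = l2 := by
  apply List.ext_getElem hlen
  intro j h1 h2
  have := h j h1
  rwa [List.getD_eq_getElem _ _ h1, List.getD_eq_getElem _ _ h2] at this

-- one region commutes with pvCombine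
theorem pvStep_comm (s : List Char) (t : List Bool) (r : Int × Int)
    (ht : t.length = s.length) (hr : 0 ≤ r.1 ∧ r.2 ≤ (s.length : Int)) :
    maskRegionA (pvCombine t s) r = pvCombine (markRegionB t r) s := by
  obtain ⟨a, b⟩ := r
  have hclen : (pvCombine t s).length = s.length := by rw [pvCombine_length, ht]; omega
  apply pvListEq_of_getD ' '
  · rw [maskRegionA_length, hclen, pvCombine_length, markRegionB_length, ht]
    omega
  · intro j hj
    rw [maskRegionA_length, hclen] at hj
    rw [maskRegionA_getD _ a b hr.1 (by omega) j (by omega),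
      pvCombine_getD _ _ _ hj ht,
      pvCombine_getD _ _ _ hj (by rw [markRegionB_length, ht]),
      markRegionB_getD _ a b hr.1 (by omega) j (by omega)]
    simp only [List.getD]
    by_cases hs : s[j]?.getD ' ' = '-'
    · simp [hs]
    · by_cases htj : t[j]?.getD false = true
      · simp [hs, htj]
      · simp only [Bool.not_eq_true] at htj
        by_cases hrange : a ≤ (j : Int) ∧ (j : Int) < b
        · simp [hs, htj, hrange]
        · simp [hs, htj, hrange]

-- the whole fold commutes
theorem pvFold_comm (s : List Char) (regions : List (Int × Int)) (t : List Bool)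
    (ht : t.length = s.length)
    (hpre : ∀ r ∈ regions, 0 ≤ r.1 ∧ r.2 ≤ (s.length : Int)) :
    regions.foldl maskRegionA (pvCombine t s) = pvCombine (regions.foldl markRegionB t) s := by
  induction regions generalizing t with
  | nil => rfl
  | cons r rs ih =>
      simp only [List.foldl_cons]
      rw [pvStep_comm s t r ht (hpre r (List.mem_cons_self)),
        ih (markRegionB t r) (by rw [markRegionB_length, ht])
          (fun r' hr' => hpre r' (List.mem_cons_of_mem _ hr'))]

theorem pvCombine_false (s : List Char) :
    pvCombine (List.replicate s.length false) s = s := by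
  apply pvListEq_of_getD ' '
  · rw [pvCombine_length]; simp
  · intro j hj
    rw [pvCombine_length] at hj
    simp only [List.length_replicate, min_self] at hj
    rw [pvCombine_getD _ _ _ hj (by simp)]
    simp

-- ===== VERDICT (by name: the statement is the Claim_ definition above) =====
theorem mask_sequence_spec : Claim_equal_mask_sequence := by
  intro seq regions _ hpre
  show mask_sequence seq regions = mask_sequence_alt seq regions
  unfold mask_sequence mask_sequence_alt
  simp only []
  rw [← pvCombine_false seq.toList, pvFold_comm seq.toList regions _ (by simp) hpre]
  rw [pvCombine_false]
  rfl
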